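-- pv_equiv track=rewrite | github.com/Scientific-Artificial-Intelligence-Lab/kd | kd/viz/dlga_eq2latex.py | _module_to_latex_base_term
-- ===== SOURCE A (Python) =====
-- from collections import Counter # 用于帮助计算重复基因，以实现幂次
--
-- def _module_to_latex_base_term(module_indices, dlga_term_names, latex_style_map):
--     """
--     将单个模块（基因索引列表）转换为 LaTeX 基础项字符串（不含系数，但含幂次）。
--     例如：[0, 1, 1] -> "u u_x^2"
--     """
--     if not module_indices: # TODO 检查在dlga中 空基因 是否被定义
--         return "1" # 空模块通常代表常数项的基础部分 (乘以系数后即为常数)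
--
--     gene_counts = Counter(module_indices)
--     latex_parts = []
--
--     # 按基因索引排序以确保一致的项顺序 optional 例如，对于模块 [1, 0] (ux, u)，我们总是得到 "u u_x" 而不是有时 "u_x u"。
--     for gene_idx in sorted(gene_counts.keys()):
--         count = gene_counts[gene_idx]
--         term_name_dlga = dlga_term_names[gene_idx] if 0 <= gene_idx < len(dlga_term_names) else f"未知G({gene_idx})"
--         term_latex_base = latex_style_map.get(term_name_dlga, term_name_dlga)
--
--         if count > 1: #    如果基因出现次数大于1，则添加 LaTeX 的幂次表示 "^{count}"
--             latex_parts.append(f"{term_latex_base}^{{{count}}}")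
--         else:
--             latex_parts.append(term_latex_base)
--
--     return " ".join(latex_parts)
-- ===== SOURCE B (Python) =====
-- def _module_to_latex_base_term(module_indices, dlga_term_names, latex_style_map):
--     # Divide-and-conquer: split the module, turn each half into an ordered
--     # (gene_idx, multiplicity) run table, and merge the tables summing the
--     # multiplicities of equal indices -- no Counter and no sorted() call.
--     if not module_indices:
--         return "1"
--
--     def merge(u, v):
--         out = []
--         i = j = 0
--         while i < len(u) and j < len(v):
--             (k1, c1), (k2, c2) = u[i], v[j]
--             if k1 < k2:
--                 out.append((k1, c1)); i += 1
--             elif k2 < k1: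
--                 out.append((k2, c2)); j += 1
--             else:
--                 out.append((k1, c1 + c2)); i += 1; j += 1
--         return out + u[i:] + v[j:]
--
--     def runs(l):
--         if len(l) == 1:
--             return [(l[0], 1)]
--         mid = len(l) // 2
--         return merge(runs(l[:mid]), runs(l[mid:]))
--
--     parts = []
--     for g, c in runs(module_indices):
--         name = dlga_term_names[g] if 0 <= g < len(dlga_term_names) else f"未知G({g})"
--         base = latex_style_map.get(name, name)
--         parts.append(f"{base}^{{{c}}}" if c > 1 else base)
--     return " ".join(parts)
-- ===== Notes on version B (the rewrite author's own statement) =====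
-- stated objective: alternative
-- what changed: Replaces the Counter-then-sort-the-keys pass by a merge-sort-style divide and conquer: the module is split in halves, each half is turned into an ordered (gene index, multiplicity) run table, and the two tables are merged while summing the multiplicities of equal indices, so neither a counting dict nor a sort call is ever used.
import Mathlib
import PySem

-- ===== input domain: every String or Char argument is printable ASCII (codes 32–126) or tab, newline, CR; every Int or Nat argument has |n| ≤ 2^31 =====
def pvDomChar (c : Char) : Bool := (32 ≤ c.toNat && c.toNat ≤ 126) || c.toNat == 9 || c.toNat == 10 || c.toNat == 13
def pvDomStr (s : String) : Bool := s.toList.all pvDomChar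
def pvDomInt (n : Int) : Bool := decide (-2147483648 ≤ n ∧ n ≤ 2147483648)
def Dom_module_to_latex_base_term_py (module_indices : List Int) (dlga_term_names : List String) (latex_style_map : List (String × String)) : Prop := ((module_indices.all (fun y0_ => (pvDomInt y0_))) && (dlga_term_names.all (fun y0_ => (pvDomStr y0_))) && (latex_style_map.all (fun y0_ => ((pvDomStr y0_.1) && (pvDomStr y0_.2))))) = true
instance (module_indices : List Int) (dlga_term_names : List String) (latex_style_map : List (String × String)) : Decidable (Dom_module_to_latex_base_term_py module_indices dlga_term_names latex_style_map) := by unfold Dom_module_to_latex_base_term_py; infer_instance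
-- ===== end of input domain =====

-- B replaces A's Counter-then-sort-the-keys pass by a merge-sort-style divide and conquer that
-- merges ordered (index, multiplicity) run tables, summing multiplicities; objective: alternative.

-- ===== PORT A =====
def module_to_latex_base_term_py (module_indices : List Int) (dlga_term_names : List String) (latex_style_map : List (String × String)) : String :=
  if module_indices = [] then "1"
  else
    let gene_counts := PySem.Dict.counter module_indices
    let latex_parts := (PySem.List.sorted gene_counts.keys (fun x => x)).foldl
      (fun (acc : List String) gene_idx =>
        let count := gene_counts.getD gene_idx 0
        let term_name_dlga :=
          if 0 ≤ gene_idx ∧ gene_idx < PySem.List.len dlga_term_names then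
            PySem.List.pyGetD dlga_term_names gene_idx ""
          else "未知G(" ++ PySem.Int.toStr gene_idx ++ ")"
        let term_latex_base := (PySem.Dict.mk latex_style_map).getD term_name_dlga term_name_dlga
        if count > 1 then
          acc ++ [term_latex_base ++ "^{" ++ PySem.Int.toStr count ++ "}"]
        else
          acc ++ [term_latex_base]) []
    PySem.Str.join " " latex_parts

-- ===== PORT B =====
-- Source B's merge: the while loop over indices i, j, written as the obvious structural
-- recursion consuming the heads of the two tables; the two tail slices u[i:], v[j:]
-- are the base cases.
def pvMerge : List (Int × Int) → List (Int × Int) → List (Int × Int)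
  | [], v => v
  | u, [] => u
  | (k1, c1) :: u, (k2, c2) :: v =>
    if k1 < k2 then (k1, c1) :: pvMerge u ((k2, c2) :: v)
    else if k2 < k1 then (k2, c2) :: pvMerge ((k1, c1) :: u) v
    else (k1, c1 + c2) :: pvMerge u v

-- Source B's runs: l[:mid] / l[mid:] with mid = len(l)//2 are List.take/List.drop at mid.
-- Python never calls runs on []; the [] => [] row is a totality guard only.
def pvRuns : List Int → List (Int × Int)
  | [] => []
  | [x] => [(x, 1)]
  | x :: y :: rest =>
    let l := x :: y :: rest
    let mid := l.length / 2
    pvMerge (pvRuns (l.take mid)) (pvRuns (l.drop mid))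
termination_by l => l.length
decreasing_by
  · simp only [List.length_take]; simp; omega
  · simp only [List.length_drop]; simp; omega

def module_to_latex_base_term_py_alt (module_indices : List Int) (dlga_term_names : List String) (latex_style_map : List (String × String)) : String :=
  if module_indices = [] then "1"
  else
    let parts := (pvRuns module_indices).foldl
      (fun (acc : List String) g =>
        let name :=
          if 0 ≤ g.1 ∧ g.1 < PySem.List.len dlga_term_names then
            PySem.List.pyGetD dlga_term_names g.1 ""
          else "未知G(" ++ PySem.Int.toStr g.1 ++ ")"
        let base := (PySem.Dict.mk latex_style_map).getD name name
        acc ++ [if g.2 > 1 then base ++ "^{" ++ PySem.Int.toStr g.2 ++ "}" else base]) []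
    PySem.Str.join " " parts

-- ===== PRECONDITION & SPEC =====
def Spec_module_to_latex_base_term_py (module_indices : List Int) (dlga_term_names : List String) (latex_style_map : List (String × String)) (out : String) : Prop := out = module_to_latex_base_term_py_alt module_indices dlga_term_names latex_style_map
instance (module_indices : List Int) (dlga_term_names : List String) (latex_style_map : List (String × String)) (out : String) : Decidable (Spec_module_to_latex_base_term_py module_indices dlga_term_names latex_style_map out) := by unfold Spec_module_to_latex_base_term_py; infer_instance

-- ===== CLAIM =====
def Claim_equal_module_to_latex_base_term_py : Prop := ∀ (module_indices : List Int) (dlga_term_names : List String) (latex_style_map : List (String × String)), Dom_module_to_latex_base_term_py module_indices dlga_term_names latex_style_map → Spec_module_to_latex_base_term_py module_indices dlga_term_names latex_style_map (module_to_latex_base_term_py module_indices dlga_term_names latex_style_map)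

-- ===== LEMMAS AND PROOFS =====

-- A's loop appends inside each branch of the 'if'; pull the branches into one appended element.
theorem pv_foldl_append_ite {α β : Type} (p : α → Prop) [DecidablePred p] (f g : α → β) (l : List α) (acc : List β) :
    l.foldl (fun acc x => if p x then acc ++ [f x] else acc ++ [g x]) acc
      = acc ++ l.map (fun x => if p x then f x else g x) := by
  induction l generalizing acc with
  | nil => simp
  | cons x xs ih =>
    simp only [List.foldl_cons, List.map_cons]
    by_cases h : p x <;> simp [h, ih]

-- R is the run table of multiset l: strictly increasing keys, same elements, exact multiplicities.
def pvRep (l : List Int) (R : List (Int × Int)) : Prop :=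
  (R.map Prod.fst).Pairwise (· < ·) ∧ (∀ a, a ∈ R.map Prod.fst ↔ a ∈ l) ∧
    ∀ p ∈ R, p.2 = (l.count p.1 : Int)

theorem pv_mem_fst_merge (a : Int) : ∀ (R S : List (Int × Int)),
    a ∈ (pvMerge R S).map Prod.fst ↔ a ∈ R.map Prod.fst ∨ a ∈ S.map Prod.fst := by
  intro R S
  induction R, S using pvMerge.induct with
  | case1 v => simp [pvMerge]
  | case2 u h => cases u with
    | nil => simp at h
    | cons p u => simp [pvMerge]
  | case3 k1 c1 u k2 c2 v h ih => rw [pvMerge]; simp only [h, if_true]; simp [ih]; tauto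
  | case4 k1 c1 u k2 c2 v h1 h2 ih => rw [pvMerge]; simp only [h1, if_false, h2, if_true]; simp [ih]; tauto
  | case5 k1 c1 u k2 c2 v h1 h2 ih =>
    have hk : k1 = k2 := by omega
    rw [pvMerge]; simp only [h1, if_false, h2]; simp [ih, hk]; tauto

-- Assemble a run table from its head run and the table of the remaining multiset.
theorem pv_rep_cons (l : List Int) (k c : Int) (R : List (Int × Int))
    (hk : k ∈ l) (hc : c = (l.count k : Int))
    (hR : pvRep (l.filter (fun y => decide (y ≠ k))) R)
    (hlt : ∀ a ∈ R.map Prod.fst, k < a) :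
    pvRep l ((k, c) :: R) := by
  obtain ⟨hpw, hmem, hcnt⟩ := hR
  refine ⟨?_, ?_, ?_⟩
  · simp only [List.map_cons, List.pairwise_cons]
    exact ⟨hlt, hpw⟩
  · intro a
    simp only [List.map_cons, List.mem_cons]
    constructor
    · rintro (rfl | ha)
      · exact hk
      · exact (List.mem_filter.mp ((hmem a).mp ha)).1
    · intro ha
      by_cases hak : a = k
      · exact Or.inl hak
      · exact Or.inr ((hmem a).mpr (List.mem_filter.mpr ⟨ha, by simpa using hak⟩))
  · intro p hp
    rcases List.mem_cons.mp hp with rfl | hp'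
    · simpa using hc
    · have hklt : k < p.1 := hlt p.1 (List.mem_map_of_mem hp')
      have hcf : (l.filter (fun y => decide (y ≠ k))).count p.1 = l.count p.1 := by
        rw [List.count_filter]; simp; omega
      rw [hcnt p hp', hcf]

-- Drop the head run: the tail is the run table of l with that key filtered out.
theorem pv_rep_tail (l : List Int) (k c : Int) (xs : List (Int × Int))
    (h : pvRep l ((k, c) :: xs)) : pvRep (l.filter (fun y => decide (y ≠ k))) xs := by
  obtain ⟨hpw, hmem, hcnt⟩ := h
  simp only [List.map_cons, List.pairwise_cons] at hpw
  refine ⟨hpw.2, ?_, ?_⟩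
  · intro a
    rw [List.mem_filter]
    constructor
    · intro ha
      have hka : k < a := hpw.1 a ha
      exact ⟨(hmem a).mp (by simp [ha]), by simp; omega⟩
    · rintro ⟨hal, hane⟩
      have hane' : a ≠ k := by simpa using hane
      rcases (by simpa using (hmem a).mpr hal : a = k ∨ a ∈ xs.map Prod.fst) with h | h
      · exact absurd h hane'
      · exact h
  · intro p hp
    have hka : k < p.1 := hpw.1 p.1 (List.mem_map_of_mem hp)
    have hcf : (l.filter (fun y => decide (y ≠ k))).count p.1 = l.count p.1 := by
      rw [List.count_filter]; simp; omega
    rw [hcf]; exact hcnt p (by simp [hp])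

-- All keys of the head-dropped tables are above k; heads of both inputs are above k too.
theorem pv_rep_merge : ∀ (R S : List (Int × Int)) (p q : List Int),
    pvRep p R → pvRep q S → pvRep (p ++ q) (pvMerge R S) := by
  intro R S
  induction R, S using pvMerge.induct with
  | case1 v =>
    intro p q hp hq
    have hpnil : p = [] := by
      rw [List.eq_nil_iff_forall_not_mem]
      intro a ha; simpa using (hp.2.1 a).mpr ha
    simpa [pvMerge, hpnil] using hq
  | case2 u h =>
    cases u with
    | nil => simp at h
    | cons r u =>
      intro p q hp hq
      have hqnil : q = [] := by
        rw [List.eq_nil_iff_forall_not_mem]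
        intro a ha; simpa using (hq.2.1 a).mpr ha
      simpa [pvMerge, hqnil] using hp
  | case3 k1 c1 u k2 c2 v h ih =>
    intro p q hp hq
    have hultk : ∀ a ∈ u.map Prod.fst, k1 < a := (List.pairwise_cons.mp (by simpa using hp.1)).1
    have hvltk : ∀ a ∈ v.map Prod.fst, k2 < a := (List.pairwise_cons.mp (by simpa using hq.1)).1
    have hk1q : k1 ∉ q := by
      intro hkq
      rcases (by simpa using (hq.2.1 k1).mpr hkq : k1 = k2 ∨ k1 ∈ v.map Prod.fst) with he | hv
      · omega
      · have := hvltk k1 hv; omega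
    have hqf : q.filter (fun y => decide (y ≠ k1)) = q :=
      List.filter_eq_self.mpr (fun b hb => by simp; rintro rfl; exact hk1q hb)
    have hrec := ih (p.filter (fun y => decide (y ≠ k1))) q (pv_rep_tail p k1 c1 u hp) hq
    have hfil : (p ++ q).filter (fun y => decide (y ≠ k1))
        = p.filter (fun y => decide (y ≠ k1)) ++ q := by
      rw [List.filter_append, hqf]
    rw [pvMerge]; simp only [h, if_true]
    refine pv_rep_cons (p ++ q) k1 c1 _ ?_ ?_ (by rwa [hfil]) ?_
    · exact List.mem_append.mpr (Or.inl ((hp.2.1 k1).mp (by simp)))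
    · have := hp.2.2 (k1, c1) (by simp)
      rw [List.count_append, List.count_eq_zero.mpr hk1q]
      simpa using this
    · intro a ha
      rcases (pv_mem_fst_merge a _ _).mp ha with hu | hs
      · exact hultk a hu
      · rcases (by simpa using hs : a = k2 ∨ a ∈ v.map Prod.fst) with rfl | hv
        · omega
        · have := hvltk a hv; omega
  | case4 k1 c1 u k2 c2 v h1 h2 ih =>
    intro p q hp hq
    have hultk : ∀ a ∈ u.map Prod.fst, k1 < a := (List.pairwise_cons.mp (by simpa using hp.1)).1
    have hvltk : ∀ a ∈ v.map Prod.fst, k2 < a := (List.pairwise_cons.mp (by simpa using hq.1)).1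
    have hk2p : k2 ∉ p := by
      intro hkp
      rcases (by simpa using (hp.2.1 k2).mpr hkp : k2 = k1 ∨ k2 ∈ u.map Prod.fst) with he | hu
      · omega
      · have := hultk k2 hu; omega
    have hpf : p.filter (fun y => decide (y ≠ k2)) = p :=
      List.filter_eq_self.mpr (fun b hb => by simp; rintro rfl; exact hk2p hb)
    have hrec := ih p (q.filter (fun y => decide (y ≠ k2))) hp (pv_rep_tail q k2 c2 v hq)
    have hfil : (p ++ q).filter (fun y => decide (y ≠ k2))
        = p ++ q.filter (fun y => decide (y ≠ k2)) := by
      rw [List.filter_append, hpf]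
    rw [pvMerge]; simp only [h1, if_false, h2, if_true]
    refine pv_rep_cons (p ++ q) k2 c2 _ ?_ ?_ (by rwa [hfil]) ?_
    · exact List.mem_append.mpr (Or.inr ((hq.2.1 k2).mp (by simp)))
    · have := hq.2.2 (k2, c2) (by simp)
      rw [List.count_append, List.count_eq_zero.mpr hk2p]
      simpa using this
    · intro a ha
      rcases (pv_mem_fst_merge a _ _).mp ha with hu | hs
      · rcases (by simpa using hu : a = k1 ∨ a ∈ u.map Prod.fst) with rfl | hu'
        · omega
        · have := hultk a hu'; omega
      · exact hvltk a hs
  | case5 k1 c1 u k2 c2 v h1 h2 ih =>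
    intro p q hp hq
    have hk : k1 = k2 := by omega
    subst hk
    have hultk : ∀ a ∈ u.map Prod.fst, k1 < a := (List.pairwise_cons.mp (by simpa using hp.1)).1
    have hvltk : ∀ a ∈ v.map Prod.fst, k1 < a := (List.pairwise_cons.mp (by simpa using hq.1)).1
    have hrec := ih (p.filter (fun y => decide (y ≠ k1))) (q.filter (fun y => decide (y ≠ k1)))
      (pv_rep_tail p k1 c1 u hp) (pv_rep_tail q k1 c2 v hq)
    have hfil : (p ++ q).filter (fun y => decide (y ≠ k1))
        = p.filter (fun y => decide (y ≠ k1)) ++ q.filter (fun y => decide (y ≠ k1)) :=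
      List.filter_append _ _
    rw [pvMerge]; simp only [h1, if_false]
    refine pv_rep_cons (p ++ q) k1 (c1 + c2) _ ?_ ?_ (by rwa [hfil]) ?_
    · exact List.mem_append.mpr (Or.inl ((hp.2.1 k1).mp (by simp)))
    · have h1' := hp.2.2 (k1, c1) (by simp)
      have h2' := hq.2.2 (k1, c2) (by simp)
      rw [List.count_append]
      push_cast
      simp only at h1' h2'
      omega
    · intro a ha
      rcases (pv_mem_fst_merge a _ _).mp ha with hu | hs
      · exact hultk a hu
      · exact hvltk a hs

theorem pv_rep_runs : ∀ (l : List Int), pvRep l (pvRuns l) := by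
  intro l
  induction l using pvRuns.induct with
  | case1 => exact ⟨by simp [pvRuns], by simp [pvRuns], by simp [pvRuns]⟩
  | case2 x =>
    refine ⟨by simp [pvRuns], by simp [pvRuns], ?_⟩
    intro p hp
    simp only [pvRuns, List.mem_singleton] at hp
    subst hp; simp
  | case3 x y rest l mid ih1 ih2 =>
    rw [pvRuns]
    have h := pv_rep_merge _ _ _ _ ih1 ih2
    rwa [List.take_append_drop] at h

-- ===== VERDICT =====
theorem module_to_latex_base_term_py_spec : Claim_equal_module_to_latex_base_term_py := by
  intro mi dtn lsm _
  unfold Spec_module_to_latex_base_term_py module_to_latex_base_term_py module_to_latex_base_term_py_alt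
  by_cases h : mi = []
  · simp [h]
  · simp only [h, if_neg, not_false_iff]
    obtain ⟨hpw, hmem, hcnt⟩ := pv_rep_runs mi
    -- A's key list equals B's key list: both strictly increasing with the elements of mi
    have hKpair : (PySem.List.sorted (PySem.Dict.counter mi).keys (fun x => x)).Pairwise (· < ·) := by
      rw [PySem.Dict.keys_counter]
      simpa using PySem.List.sorted_ofList_pairwise_lt mi
    have hKeq : PySem.List.sorted (PySem.Dict.counter mi).keys (fun x => x)
        = (pvRuns mi).map Prod.fst := by
      have hnodupB : ((pvRuns mi).map Prod.fst).Nodup :=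
        List.Pairwise.imp (fun h => ne_of_lt h) hpw
      have hnodupK : (PySem.Dict.counter mi).keys.Nodup := PySem.Dict.nodup_keys_counter mi
      have hperm : ((pvRuns mi).map Prod.fst).Perm (PySem.Dict.counter mi).keys := by
        rw [List.perm_ext_iff_of_nodup hnodupB hnodupK]
        intro a
        rw [hmem a, PySem.Dict.keys_counter, PySem.Set.mem_ofList]
      exact PySem.List.sorted_eq_of_perm_of_pairwise_lt _ _ _ hperm (by simpa using hpw)
    -- the run table is the key list paired with mi's counts
    have hruns : pvRuns mi = ((pvRuns mi).map Prod.fst).map (fun k => (k, (mi.count k : Int))) := by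
      rw [List.map_map]
      conv_lhs => rw [← List.map_id (pvRuns mi)]
      refine List.map_congr_left ?_
      intro p hp
      have := hcnt p hp
      simp only [id, Function.comp]
      rw [← this]
    rw [pv_foldl_append_ite, PySem.List.foldl_append_singleton_eq_map, hruns, ← hKeq,
      List.map_map]
    simp only [List.nil_append]
    refine congrArg _ (List.map_congr_left ?_)
    intro k _
    simp only [Function.comp, PySem.Dict.getD_counter]
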